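-- pv_equiv track=rewrite | github.com/Skothagattu11/hos-agentic-ai-prod | services/circadian_analysis_service.py | _extract_time_periods
-- ===== SOURCE A (Python) =====
-- def _extract_time_periods(timeline: list, target_zone: str) -> list:
--     """Extract consecutive time periods for a given zone"""
--     periods = []
--     start_time = None
--
--     for i, slot in enumerate(timeline):
--         if slot["zone"] == target_zone:
--             if start_time is None:
--                 start_time = slot["time"]
--         else:
--             if start_time is not None:
--                 # End of period
--                 periods.append(f"{start_time}-{timeline[i-1]['time']}")
--                 start_time = None
--
--     # Handle period extending to end of day
--     if start_time is not None:
--         periods.append(f"{start_time}-23:45")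
--
--     return periods
-- ===== SOURCE B (Python) =====
-- def _extract_time_periods(timeline: list, target_zone: str) -> list:
--     # Index-segmentation: collect matching indices, split them into maximal
--     # consecutive runs, and emit one "start-end" period per run.
--     idxs = [i for i, slot in enumerate(timeline) if slot["zone"] == target_zone]
--     n = len(timeline)
--     periods = []
--     j = 0
--     while j < len(idxs):
--         k = j
--         while k + 1 < len(idxs) and idxs[k + 1] == idxs[k] + 1:
--             k += 1
--         start = timeline[idxs[j]]["time"]
--         end = "23:45" if idxs[k] == n - 1 else timeline[idxs[k]]["time"]
--         periods.append(f"{start}-{end}")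
--         j = k + 1
--     return periods
-- ===== Notes on version B (the rewrite author's own statement) =====
-- stated objective: alternative
-- what changed: Replaces A's single-pass start_time state machine by index segmentation: collect the matching indices, split them into maximal runs of consecutive indices, and emit one 'start-end' period per run (with the 23:45 sentinel only for a run reaching the last index).
import Mathlib
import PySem

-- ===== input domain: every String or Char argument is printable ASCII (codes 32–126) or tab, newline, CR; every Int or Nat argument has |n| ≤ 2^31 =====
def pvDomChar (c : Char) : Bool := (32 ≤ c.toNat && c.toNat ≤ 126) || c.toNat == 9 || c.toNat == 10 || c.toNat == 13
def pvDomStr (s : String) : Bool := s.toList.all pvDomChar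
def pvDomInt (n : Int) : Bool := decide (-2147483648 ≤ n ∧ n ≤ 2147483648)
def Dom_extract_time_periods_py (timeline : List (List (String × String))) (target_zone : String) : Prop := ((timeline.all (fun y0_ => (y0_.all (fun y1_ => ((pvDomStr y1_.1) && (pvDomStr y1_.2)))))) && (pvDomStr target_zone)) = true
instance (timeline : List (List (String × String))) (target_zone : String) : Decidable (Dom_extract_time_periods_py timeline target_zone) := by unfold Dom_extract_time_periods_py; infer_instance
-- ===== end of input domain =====

-- B replaces A's start_time state machine by index-run segmentation (collect matching
-- indices, split into maximal consecutive runs, emit one period per run); objective: alternative.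


-- ===== PORT A =====
-- slot["zone"] / slot["time"]: Python raises KeyError when the key is absent; the ports use
-- getD "" there — exact on Pre_ (which demands exactly the keys A's accesses need).
def pvZone (slot : List (String × String)) : String :=
  ((PySem.Dict.mk slot).get? "zone").getD ""

def pvTime (slot : List (String × String)) : String :=
  ((PySem.Dict.mk slot).get? "time").getD ""

-- loop body of A's `for i, slot in enumerate(timeline)`
def pvStepA (T : List (List (String × String))) (tz : String)
    (st : List String × Option String) (p : Int × List (String × String)) :
    List String × Option String :=
  if pvZone p.2 == tz then
    match st.2 with
    | none => (st.1, some (pvTime p.2))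
    | some _ => st
  else
    match st.2 with
    | some s => (st.1 ++ [s ++ "-" ++ pvTime ((PySem.List.pyGet? T (p.1 - 1)).getD [])], none)
    | none => st

-- A's trailing `if start_time is not None: periods.append(f"{start_time}-23:45")`
def pvFinish (r : List String × Option String) : List String :=
  match r.2 with
  | some s => r.1 ++ [s ++ "-23:45"]
  | none => r.1

def extract_time_periods_py (timeline : List (List (String × String))) (target_zone : String) : List String :=
  pvFinish ((PySem.List.enumerate timeline 0).foldl (pvStepA timeline target_zone) ([], none))

-- ===== PORT B =====
-- idxs = [i for i, slot in enumerate(timeline) if slot["zone"] == target_zone]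
def pvIdxs (tz : String) : Nat → List (List (String × String)) → List Nat
  | _, [] => []
  | i, sl :: rest => if pvZone sl == tz then i :: pvIdxs tz (i + 1) rest else pvIdxs tz (i + 1) rest

-- inner while: extend k while the next index is consecutive; returns (idxs[k], rest after the run)
def pvRun : Nat → List Nat → Nat × List Nat
  | j, [] => (j, [])
  | j, k :: rest => if k = j + 1 then pvRun k rest else (j, k :: rest)

theorem pvRun_snd_length_le : ∀ (j : Nat) (l : List Nat), (pvRun j l).2.length ≤ l.length := by
  intro j l
  induction l generalizing j with
  | nil => simp [pvRun]
  | cons k rest ih =>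
    simp only [pvRun]
    split
    · exact le_trans (ih k) (Nat.le_succ _)
    · simp

-- outer while over idxs: one period per maximal consecutive run
def pvPeriods (T : List (List (String × String))) (n : Nat) : List Nat → List String
  | [] => []
  | j :: rest =>
    (pvTime (T.getD j []) ++ "-" ++
      (if (pvRun j rest).1 = n - 1 then "23:45" else pvTime (T.getD (pvRun j rest).1 []))) ::
      pvPeriods T n (pvRun j rest).2
  termination_by l => l.length
  decreasing_by exact Nat.lt_succ_of_le (pvRun_snd_length_le _ _)

def extract_time_periods_py_alt (timeline : List (List (String × String))) (target_zone : String) : List String :=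
  pvPeriods timeline timeline.length (pvIdxs target_zone 0 timeline)

-- ===== PRECONDITION & SPEC =====
def pvHasKey (slot : List (String × String)) (k : String) : Bool :=
  ((PySem.Dict.mk slot).get? k).isSome

def pvIsZone (slot : List (String × String)) (tz : String) : Bool :=
  (PySem.Dict.mk slot).get? "zone" == some tz

-- Exactly the inputs on which Python A returns (no KeyError): every slot has a "zone" key, and a
-- matching slot that starts a run or ends a run followed by a non-matching slot has a "time" key
-- (those are the only "time" accesses A performs).
def Pre_extract_time_periods_py (timeline : List (List (String × String))) (target_zone : String) : Prop :=
  ∀ i, i < timeline.length →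
    pvHasKey (timeline.getD i []) "zone" = true ∧
    (pvIsZone (timeline.getD i []) target_zone = true →
      (((i = 0 ∨ ¬ pvIsZone (timeline.getD (i - 1) []) target_zone = true) →
          pvHasKey (timeline.getD i []) "time" = true) ∧
       ((i + 1 < timeline.length ∧ ¬ pvIsZone (timeline.getD (i + 1) []) target_zone = true) →
          pvHasKey (timeline.getD i []) "time" = true)))

instance (timeline : List (List (String × String))) (target_zone : String) : Decidable (Pre_extract_time_periods_py timeline target_zone) := by
  unfold Pre_extract_time_periods_py; infer_instance

def pvWitness_extract_time_periods_py : (List (List (String × String))) × String :=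
  ([[("zone", "deep"), ("time", "00:00")], [("zone", "light"), ("time", "00:15")],
    [("zone", "deep"), ("time", "00:30")]], "deep")

def Spec_extract_time_periods_py (timeline : List (List (String × String))) (target_zone : String) (out : List String) : Prop := out = extract_time_periods_py_alt timeline target_zone
instance (timeline : List (List (String × String))) (target_zone : String) (out : List String) : Decidable (Spec_extract_time_periods_py timeline target_zone out) := by unfold Spec_extract_time_periods_py; infer_instance

-- ===== CLAIM (what is proved, stated in full; the proofs are below) =====
def Claim_equal_extract_time_periods_py : Prop := ∀ (timeline : List (List (String × String))) (target_zone : String), Dom_extract_time_periods_py timeline target_zone → Pre_extract_time_periods_py timeline target_zone → Spec_extract_time_periods_py timeline target_zone (extract_time_periods_py timeline target_zone)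

-- ===== LEMMAS AND PROOFS =====

-- reference state machine both ports are reduced to: state = some (start, time of last matching slot)
def pvSpec (tz : String) : Option (String × String) → List (List (String × String)) → List String
  | none, [] => []
  | some sl2, [] => [sl2.1 ++ "-" ++ "23:45"]
  | none, sl :: rest =>
    if pvZone sl == tz then pvSpec tz (some (pvTime sl, pvTime sl)) rest else pvSpec tz none rest
  | some sl2, sl :: rest =>
    if pvZone sl == tz then pvSpec tz (some (sl2.1, pvTime sl)) rest
    else (sl2.1 ++ "-" ++ sl2.2) :: pvSpec tz none rest

theorem pv_dash2345 (s : String) : s ++ "-" ++ "23:45" = s ++ "-23:45" := by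
  rw [String.append_assoc]; congr 1

theorem pvA_eq_spec (tz : String) :
    ∀ (suf pre : List (List (String × String))) (acc : List String) (st : Option (String × String)),
      (∀ s last, st = some (s, last) → ∃ pre' x, pre = pre' ++ [x] ∧ pvTime x = last) →
      pvFinish ((PySem.List.enumerate suf (pre.length : Int)).foldl (pvStepA (pre ++ suf) tz)
          (acc, st.map Prod.fst)) = acc ++ pvSpec tz st suf := by
  intro suf
  induction suf with
  | nil =>
    intro pre acc st hinv
    cases st with
    | none => simp [PySem.List.enumerate_nil, pvFinish, pvSpec]
    | some sl2 =>
      simp [PySem.List.enumerate_nil, pvFinish, pvSpec, pv_dash2345]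
  | cons sl rest ih =>
    intro pre acc st hinv
    rw [PySem.List.enumerate_cons, List.foldl_cons]
    by_cases h : (pvZone sl == tz) = true
    · cases st with
      | none =>
        have hstep : pvStepA (pre ++ sl :: rest) tz (acc, none) ((pre.length : Int), sl)
            = (acc, some (pvTime sl)) := by simp [pvStepA, h]
        rw [show (Option.map Prod.fst (none : Option (String × String))) = none from rfl, hstep]
        have := ih (pre ++ [sl]) acc (some (pvTime sl, pvTime sl))
          (by intro s last hs; exact ⟨pre, sl, rfl, by cases hs; rfl⟩)
        simp only [List.length_append, List.length_singleton, List.append_assoc,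
          List.singleton_append, Option.map_some] at this
        rw [show ((pre.length : Int) + 1) = (((pre.length + 1 : Nat)) : Int) by push_cast; ring]
        rw [this]
        simp [pvSpec, h]
      | some sl2 =>
        obtain ⟨s, last⟩ := sl2
        have hstep : pvStepA (pre ++ sl :: rest) tz (acc, some s) ((pre.length : Int), sl)
            = (acc, some s) := by simp [pvStepA, h]
        rw [show (Option.map Prod.fst (some (s, last))) = some s from rfl, hstep]
        have := ih (pre ++ [sl]) acc (some (s, pvTime sl))
          (by intro s' last' hs; exact ⟨pre, sl, rfl, by cases hs; rfl⟩)
        simp only [List.length_append, List.length_singleton, List.append_assoc,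
          List.singleton_append, Option.map_some] at this
        rw [show ((pre.length : Int) + 1) = (((pre.length + 1 : Nat)) : Int) by push_cast; ring]
        rw [this]
        simp [pvSpec, h]
    · cases st with
      | none =>
        have hstep : pvStepA (pre ++ sl :: rest) tz (acc, none) ((pre.length : Int), sl)
            = (acc, none) := by simp [pvStepA, h]
        rw [show (Option.map Prod.fst (none : Option (String × String))) = none from rfl, hstep]
        have := ih (pre ++ [sl]) acc none (by simp)
        simp only [List.length_append, List.length_singleton, List.append_assoc,
          List.singleton_append, Option.map_none] at this
        rw [show ((pre.length : Int) + 1) = (((pre.length + 1 : Nat)) : Int) by push_cast; ring]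
        rw [this]
        simp [pvSpec, h]
      | some sl2 =>
        obtain ⟨s, last⟩ := sl2
        obtain ⟨pre', x, hpre, hlast⟩ := hinv s last rfl
        have hget : PySem.List.pyGet? (pre ++ sl :: rest) ((pre.length : Int) - 1) = some x := by
          subst hpre
          rw [show ((((pre' ++ [x]).length : Nat) : Int) - 1) = ((pre'.length : Nat) : Int) by
            simp only [List.length_append, List.length_singleton]; push_cast; ring]
          rw [show (pre' ++ [x]) ++ sl :: rest = pre' ++ x :: (sl :: rest) by simp]
          exact PySem.List.pyGet?_append_length pre' (sl :: rest) x
        have hstep : pvStepA (pre ++ sl :: rest) tz (acc, some s) ((pre.length : Int), sl)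
            = (acc ++ [s ++ "-" ++ last], none) := by
          simp [pvStepA, h, hget, hlast]
        rw [show (Option.map Prod.fst (some (s, last))) = some s from rfl, hstep]
        have := ih (pre ++ [sl]) (acc ++ [s ++ "-" ++ last]) none (by simp)
        simp only [List.length_append, List.length_singleton, List.append_assoc,
          List.singleton_append, Option.map_none] at this
        rw [show ((pre.length : Int) + 1) = (((pre.length + 1 : Nat)) : Int) by push_cast; ring]
        rw [this]
        simp [pvSpec, h]

theorem pvIdxs_ge (tz : String) :
    ∀ (l : List (List (String × String))) (i x : Nat), x ∈ pvIdxs tz i l → i ≤ x := by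
  intro l
  induction l with
  | nil => simp [pvIdxs]
  | cons sl rest ih =>
    intro i x hx
    simp only [pvIdxs] at hx
    split at hx
    · rcases List.mem_cons.mp hx with h | h
      · omega
      · have := ih (i + 1) x h; omega
    · have := ih (i + 1) x hx; omega

theorem pvRun_eq_of_ne (j : Nat) (l : List Nat) (h : ∀ x ∈ l, x ≠ j + 1) : pvRun j l = (j, l) := by
  cases l with
  | nil => rfl
  | cons k rest => simp [pvRun, h k (List.mem_cons_self)]

theorem pv_drop_getD (T : List (List (String × String))) (i : Nat)
    (sl : List (String × String)) (rest : List (List (String × String)))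
    (h : T.drop i = sl :: rest) : T.getD i [] = sl := by
  have h0 : T[i]? = some sl := by
    have h1 := congrArg (fun l : List (List (String × String)) => l[0]?) h
    simpa [List.getElem?_drop] using h1
  simp [List.getD, h0]

theorem pv_drop_succ (T : List (List (String × String))) (i : Nat)
    (sl : List (String × String)) (rest : List (List (String × String)))
    (h : T.drop i = sl :: rest) : T.drop (i + 1) = rest := by
  have h1 := congrArg (List.drop 1) h
  simpa [List.drop_drop, Nat.add_comm] using h1

theorem pvB_eq_spec (tz : String) (T : List (List (String × String))) :
    ∀ (m : Nat),
      (∀ (suf : List (List (String × String))) (i : Nat), suf.length = m → T.drop i = suf →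
        i + m = T.length →
        pvPeriods T T.length (pvIdxs tz i suf) = pvSpec tz none suf)
      ∧
      (∀ (rest : List (List (String × String))) (i : Nat) (s : String), rest.length = m →
        T.drop (i + 1) = rest → (i + 1) + m = T.length →
        pvSpec tz (some (s, pvTime (T.getD i []))) rest =
          (s ++ "-" ++ (if (pvRun i (pvIdxs tz (i + 1) rest)).1 = T.length - 1 then "23:45"
              else pvTime (T.getD (pvRun i (pvIdxs tz (i + 1) rest)).1 []))) ::
            pvPeriods T T.length (pvRun i (pvIdxs tz (i + 1) rest)).2) := by
  intro m
  induction m using Nat.strong_induction_on with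
  | _ m IH =>
    constructor
    · intro suf i hlen hdrop hsum
      cases suf with
      | nil => simp [pvIdxs, pvPeriods, pvSpec]
      | cons sl rest =>
        have hsl : T.getD i [] = sl := pv_drop_getD T i sl rest hdrop
        have hdrop' : T.drop (i + 1) = rest := pv_drop_succ T i sl rest hdrop
        simp only [List.length_cons] at hlen
        by_cases h : (pvZone sl == tz) = true
        · -- run starts at i
          have hrun := (IH (rest.length) (by omega)).2 rest i (pvTime sl) rfl hdrop' (by omega)
          rw [hsl] at hrun
          simp only [pvIdxs, h, if_pos]
          rw [pvPeriods]
          simp only [pvSpec, h, if_pos, hsl]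
          exact hrun.symm ▸ hrun.symm ▸ hrun ▸ rfl
        · have h' : (pvZone sl == tz) = false := by simpa using h
          have hB := (IH (rest.length) (by omega)).1 rest (i + 1) rfl hdrop' (by omega)
          simp only [pvIdxs, pvSpec, h', Bool.false_eq_true, if_false]
          exact hB
    · intro rest i s hlen hdrop hsum
      cases rest with
      | nil =>
        have : i = T.length - 1 := by simp at hlen; omega
        simp [pvIdxs, pvRun, pvSpec, pvPeriods, this]
      | cons sl rest' =>
        have hsl : T.getD (i + 1) [] = sl := pv_drop_getD T (i + 1) sl rest' hdrop
        have hdrop' : T.drop (i + 2) = rest' := pv_drop_succ T (i + 1) sl rest' hdrop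
        simp only [List.length_cons] at hlen
        by_cases h : (pvZone sl == tz) = true
        · -- run continues at i+1
          have hrun := (IH (rest'.length) (by omega)).2 rest' (i + 1) s rfl hdrop' (by omega)
          rw [hsl] at hrun
          have hidx : pvIdxs tz (i + 1) (sl :: rest') = (i + 1) :: pvIdxs tz (i + 1 + 1) rest' := by
            simp [pvIdxs, h]
          have hskip : pvRun i ((i + 1) :: pvIdxs tz (i + 1 + 1) rest')
              = pvRun (i + 1) (pvIdxs tz (i + 1 + 1) rest') := by
            simp [pvRun]
          rw [hidx, hskip]
          simp only [pvSpec, h, if_pos]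
          exact hrun
        · -- run ends at i
          have hne : ∀ x ∈ pvIdxs tz (i + 2) rest', x ≠ i + 1 := by
            intro x hx
            have := pvIdxs_ge tz rest' (i + 2) x hx
            omega
          have hrun : pvRun i (pvIdxs tz (i + 2) rest') = (i, pvIdxs tz (i + 2) rest') :=
            pvRun_eq_of_ne _ _ hne
          have hine : ¬ (i = T.length - 1) := by omega
          have hB := (IH (rest'.length) (by omega)).1 rest' (i + 2) rfl hdrop' (by omega)
          have h' : (pvZone sl == tz) = false := by simpa using h
          have hidx : pvIdxs tz (i + 1) (sl :: rest') = pvIdxs tz (i + 2) rest' := by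
            simp only [pvIdxs, h', Bool.false_eq_true, if_false]
          rw [hidx, hrun]
          simp only [pvSpec, h', Bool.false_eq_true, if_false]
          simp [hine, hB]

-- ===== VERDICT (by name: the statement is the Claim_ definition above) =====
theorem extract_time_periods_py_spec : Claim_equal_extract_time_periods_py := by
  intro timeline target_zone _ _
  unfold Spec_extract_time_periods_py
  have hA : extract_time_periods_py timeline target_zone = pvSpec target_zone none timeline := by
    have := pvA_eq_spec target_zone timeline [] [] none (by simp)
    simpa [extract_time_periods_py] using this
  have hB : extract_time_periods_py_alt timeline target_zone = pvSpec target_zone none timeline := by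
    have := (pvB_eq_spec target_zone timeline timeline.length).1 timeline 0 rfl rfl (by simp)
    simpa [extract_time_periods_py_alt] using this
  rw [hA, hB]
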